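-- pv_equiv track=rewrite | github.com/terminaldweller/colo | colo/colo.py | color_ansi
-- ===== SOURCE A (Python) =====
-- BASH_STR = "\x1b[38;5;XXXmcolourXXX YYY \x1b[0m\t"
--
-- BASH_ANSI_STR = "\\x1b[38;5;XXXm"
--
-- def color_ansi(number_colo_list) -> str:
--     """print color ansi escape sequnces"""
--     print_list = str()
--     for i, number_colo in enumerate(number_colo_list):
--         if i % 6 == 0 and i != 0:
--             print_list += "\n"
--         print_list += BASH_STR.replace("XXX", number_colo).replace(
--             "YYY", BASH_ANSI_STR.replace("XXX", number_colo)
--         )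
--     return print_list
-- ===== SOURCE B (Python) =====
-- BASH_STR = "\x1b[38;5;XXXmcolourXXX YYY \x1b[0m\t"
--
-- BASH_ANSI_STR = "\\x1b[38;5;XXXm"
--
--
-- def _cell(number_colo):
--     return BASH_STR.replace("XXX", number_colo).replace(
--         "YYY", BASH_ANSI_STR.replace("XXX", number_colo)
--     )
--
--
-- def color_ansi(number_colo_list) -> str:
--     """print color ansi escape sequnces"""
--     cells = [_cell(c) for c in number_colo_list]
--     rows = [cells[i : i + 6] for i in range(0, len(cells), 6)]
--     return "\n".join("".join(row) for row in rows)
-- ===== Notes on version B (the rewrite author's own statement) =====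
-- stated objective: simpler
-- what changed: Replaces the index-tracking accumulation loop with its inline 'i % 6 == 0 and i != 0' newline test by a map-to-cells pass followed by chunking into rows of 6 and joining rows with newline.
import Mathlib
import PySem

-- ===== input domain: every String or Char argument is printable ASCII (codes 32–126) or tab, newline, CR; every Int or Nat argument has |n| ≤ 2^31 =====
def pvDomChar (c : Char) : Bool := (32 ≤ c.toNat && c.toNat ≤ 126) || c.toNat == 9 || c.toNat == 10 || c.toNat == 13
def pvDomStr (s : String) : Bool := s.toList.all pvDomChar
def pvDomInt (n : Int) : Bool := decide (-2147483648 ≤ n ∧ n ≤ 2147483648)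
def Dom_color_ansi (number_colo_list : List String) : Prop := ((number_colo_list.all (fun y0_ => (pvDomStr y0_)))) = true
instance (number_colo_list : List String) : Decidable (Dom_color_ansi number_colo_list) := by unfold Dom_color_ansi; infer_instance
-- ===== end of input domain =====

-- B builds the same display string by mapping each colour to its cell, chunking the
-- cells into rows of 6 and joining rows with newline, instead of A's index-tracking
-- loop with an inline 'i % 6 == 0 and i != 0' newline test (objective: simpler).

-- ===== PORT A =====
def BASH_STR : String := "\x1b[38;5;XXXmcolourXXX YYY \x1b[0m\t"

def BASH_ANSI_STR : String := "\\x1b[38;5;XXXm"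

-- the 'for i, number_colo in enumerate(...)' loop of A, index carried explicitly
def colorAnsiLoop (i : Nat) (print_list : String) : List String → String
  | [] => print_list
  | number_colo :: rest =>
      colorAnsiLoop (i + 1)
        ((if i % 6 == 0 && i != 0 then print_list ++ "\n" else print_list) ++
          PySem.Str.replace (PySem.Str.replace BASH_STR "XXX" number_colo) "YYY"
            (PySem.Str.replace BASH_ANSI_STR "XXX" number_colo))
        rest

def color_ansi (number_colo_list : List String) : String :=
  colorAnsiLoop 0 "" number_colo_list

-- ===== PORT B =====
-- Source B's _cell helper
def pvCell (number_colo : String) : String :=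
  PySem.Str.replace (PySem.Str.replace BASH_STR "XXX" number_colo) "YYY"
    (PySem.Str.replace BASH_ANSI_STR "XXX" number_colo)

-- Source B's 'cells[i:i+6] for i in range(0, len(cells), 6)' grouping, each row already joined
def pvChunks : List String → List String
  | [] => []
  | x :: rest =>
      PySem.Str.join "" (List.take 6 (x :: rest)) :: pvChunks (List.drop 6 (x :: rest))
  termination_by l => l.length
  decreasing_by simp

def color_ansi_alt (number_colo_list : List String) : String :=
  PySem.Str.join "\n" (pvChunks (number_colo_list.map pvCell))

-- ===== PRECONDITION & SPEC =====
def Spec_color_ansi (number_colo_list : List String) (out : String) : Prop := out = color_ansi_alt number_colo_list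
instance (number_colo_list : List String) (out : String) : Decidable (Spec_color_ansi number_colo_list out) := by unfold Spec_color_ansi; infer_instance

-- ===== CLAIM (what is proved, stated in full; the proofs are below) =====
def Claim_equal_color_ansi : Prop := ∀ (number_colo_list : List String), Dom_color_ansi number_colo_list → Spec_color_ansi number_colo_list (color_ansi number_colo_list)

-- ===== LEMMAS AND PROOFS =====

lemma colorAnsiLoop_toList (n : Nat) : ∀ (xs : List String) (i : Nat) (acc : String),
    xs.length ≤ n → i % 6 = 0 →
    (colorAnsiLoop i acc xs).toList =
      acc.toList ++ (if i = 0 ∨ xs = [] then ([] : List Char) else ['\n']) ++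
        (PySem.Str.join "\n" (pvChunks (xs.map pvCell))).toList := by
  induction n with
  | zero =>
    intro xs i acc hlen hi
    have hxs : xs = [] := by cases xs with | nil => rfl | cons a t => simp at hlen
    subst hxs
    simp [colorAnsiLoop, pvChunks, PySem.Str.toList_join, PySem.Chars.join_nil]
  | succ m ih =>
    intro xs i acc hlen hi
    have h1 : (i + 1) % 6 = 1 := by omega
    have h2 : (i + 1 + 1) % 6 = 2 := by omega
    have h3 : (i + 1 + 1 + 1) % 6 = 3 := by omega
    have h4 : (i + 1 + 1 + 1 + 1) % 6 = 4 := by omega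
    have h5 : (i + 1 + 1 + 1 + 1 + 1) % 6 = 5 := by omega
    have h6 : (i + 1 + 1 + 1 + 1 + 1 + 1) % 6 = 0 := by omega
    rcases xs with _ | ⟨a, _ | ⟨b, _ | ⟨c, _ | ⟨d, _ | ⟨e, _ | ⟨f, rest⟩⟩⟩⟩⟩⟩
    · simp [colorAnsiLoop, pvChunks, PySem.Str.toList_join, PySem.Chars.join_nil]
    · by_cases hi0 : i = 0 <;>
        simp [colorAnsiLoop, pvChunks, hi, hi0, pvCell,
          PySem.Str.toList_join, PySem.Chars.join_singleton]
    · by_cases hi0 : i = 0 <;>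
        simp [colorAnsiLoop, pvChunks, hi, hi0, h1, pvCell,
          PySem.Str.toList_join, PySem.Chars.join_singleton, PySem.Chars.join_cons_cons]
    · by_cases hi0 : i = 0 <;>
        simp [colorAnsiLoop, pvChunks, hi, hi0, h1, h2, pvCell,
          PySem.Str.toList_join, PySem.Chars.join_singleton, PySem.Chars.join_cons_cons]
    · by_cases hi0 : i = 0 <;>
        simp [colorAnsiLoop, pvChunks, hi, hi0, h1, h2, h3, pvCell,
          PySem.Str.toList_join, PySem.Chars.join_singleton, PySem.Chars.join_cons_cons]
    · by_cases hi0 : i = 0 <;>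
        simp [colorAnsiLoop, pvChunks, hi, hi0, h1, h2, h3, h4, pvCell,
          PySem.Str.toList_join, PySem.Chars.join_singleton, PySem.Chars.join_cons_cons]
    · have hlen' : rest.length ≤ m := by simp at hlen; omega
      simp only [colorAnsiLoop]
      rw [ih rest (i + 1 + 1 + 1 + 1 + 1 + 1) _ hlen' h6]
      have hchunks : pvChunks ((a :: b :: c :: d :: e :: f :: rest).map pvCell) =
          PySem.Str.join "" [pvCell a, pvCell b, pvCell c, pvCell d, pvCell e, pvCell f] ::
            pvChunks (rest.map pvCell) := by
        simp [pvChunks]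
      rcases rest with _ | ⟨r, rs⟩
      · by_cases hi0 : i = 0 <;>
          simp [pvChunks, hi, hi0, h1, h2, h3, h4, h5, pvCell,
            PySem.Str.toList_join, PySem.Chars.join_singleton, PySem.Chars.join_cons_cons]
      · have hc2 : pvChunks ((r :: rs).map pvCell) =
            PySem.Str.join "" (List.take 6 (pvCell r :: rs.map pvCell)) ::
              pvChunks (List.drop 6 (pvCell r :: rs.map pvCell)) := by
          simp [pvChunks]
        rw [hchunks, hc2]
        by_cases hi0 : i = 0 <;>
          simp [hi, hi0, h1, h2, h3, h4, h5, pvCell,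
            PySem.Str.toList_join, PySem.Chars.join_singleton, PySem.Chars.join_cons_cons]

-- ===== VERDICT (by name: the statement is the Claim_ definition above) =====
theorem color_ansi_spec : Claim_equal_color_ansi := by
  intro l _
  have h := colorAnsiLoop_toList l.length l 0 "" le_rfl rfl
  simp at h
  show color_ansi l = color_ansi_alt l
  apply String.toList_injective
  simpa [color_ansi, color_ansi_alt, PySem.Str.toList_join] using h
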